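-- pv_equiv track=rewrite | github.com/Camilocastellanos1002/Learning-Python | clase9 (12-10-2023)/contaminacion.py | mayor_problem
-- ===== SOURCE A (Python) =====
-- def mayor_problem(names,smells,illegal_towns,pollution_rivers):
--     sum_problem=[]
--     for i in range(len(names)):
--         sum_problem.append(smells[i]+illegal_towns[i]+pollution_rivers[i])
--     mayor=max(sum_problem)
--     position=sum_problem.index(mayor)
--     town=names[position]
--     return mayor,town
-- ===== SOURCE B (Python) =====
-- def mayor_problem(names, smells, illegal_towns, pollution_rivers):
--     # single pass: running maximum with first-occurrence tie-breaking (strict >)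
--     best = smells[0] + illegal_towns[0] + pollution_rivers[0]
--     town = names[0]
--     for i in range(1, len(names)):
--         c = smells[i] + illegal_towns[i] + pollution_rivers[i]
--         if c > best:
--             best = c
--             town = names[i]
--     return best, town
-- ===== Notes on version B (the rewrite author's own statement) =====
-- stated objective: simpler
-- what changed: Replaces A's three-pass scheme (build a sums list, max() over it, then .index() to recover the position) with one pass that tracks the running maximum sum and its town directly, building no intermediate list.
import Mathlib
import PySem

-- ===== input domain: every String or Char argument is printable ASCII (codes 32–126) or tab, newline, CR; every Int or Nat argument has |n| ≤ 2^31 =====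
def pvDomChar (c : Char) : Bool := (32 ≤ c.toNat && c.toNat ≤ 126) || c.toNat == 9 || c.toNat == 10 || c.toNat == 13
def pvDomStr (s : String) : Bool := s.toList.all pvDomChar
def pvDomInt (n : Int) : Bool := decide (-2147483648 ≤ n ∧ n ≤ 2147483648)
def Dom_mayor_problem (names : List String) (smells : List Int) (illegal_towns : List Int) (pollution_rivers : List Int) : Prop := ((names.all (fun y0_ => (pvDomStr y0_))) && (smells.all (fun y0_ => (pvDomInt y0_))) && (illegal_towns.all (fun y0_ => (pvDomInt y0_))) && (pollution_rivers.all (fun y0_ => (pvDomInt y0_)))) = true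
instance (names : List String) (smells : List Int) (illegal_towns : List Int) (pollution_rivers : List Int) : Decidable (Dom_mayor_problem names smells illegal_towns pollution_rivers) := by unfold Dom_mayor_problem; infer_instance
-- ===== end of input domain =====

-- B replaces A's three passes (build sums list, max(), .index()) by one running-maximum pass
-- that keeps no intermediate list; objective: simpler.

-- ===== PORT A =====
def mayor_problem (names : List String) (smells : List Int) (illegal_towns : List Int) (pollution_rivers : List Int) : Int × String :=
  let sum_problem := (PySem.List.pyRange 0 (names.length : Int) 1).foldl
    (fun acc i => acc ++ [PySem.List.pyGetD smells i 0 + PySem.List.pyGetD illegal_towns i 0 + PySem.List.pyGetD pollution_rivers i 0]) []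
  match PySem.List.max? sum_problem (fun x => x) with
  | none => (0, "")            -- Python: max([]) raises ValueError; outside Pre_
  | some mayor =>
    match PySem.List.index? sum_problem mayor with
    | none => (0, "")          -- unreachable (mayor ∈ sum_problem)
    | some position => (mayor, PySem.List.pyGetD names (position : Int) "")

-- ===== PORT B =====
def mayor_problem_alt (names : List String) (smells : List Int) (illegal_towns : List Int) (pollution_rivers : List Int) : Int × String :=
  let best := PySem.List.pyGetD smells 0 0 + PySem.List.pyGetD illegal_towns 0 0 + PySem.List.pyGetD pollution_rivers 0 0
  let town := PySem.List.pyGetD names 0 ""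
  (PySem.List.pyRange 1 (names.length : Int) 1).foldl
    (fun acc i =>
      let c := PySem.List.pyGetD smells i 0 + PySem.List.pyGetD illegal_towns i 0 + PySem.List.pyGetD pollution_rivers i 0
      if acc.1 < c then (c, PySem.List.pyGetD names i "") else acc)
    (best, town)

-- ===== PRECONDITION & SPEC =====
-- Pre_ excludes exactly the inputs where the Python A raises: empty names (ValueError from
-- max([])) and companion lists shorter than names (IndexError).
def Pre_mayor_problem (names : List String) (smells : List Int) (illegal_towns : List Int) (pollution_rivers : List Int) : Prop :=
  names ≠ [] ∧ names.length ≤ smells.length ∧ names.length ≤ illegal_towns.length ∧ names.length ≤ pollution_rivers.length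
instance (names : List String) (smells : List Int) (illegal_towns : List Int) (pollution_rivers : List Int) : Decidable (Pre_mayor_problem names smells illegal_towns pollution_rivers) := by unfold Pre_mayor_problem; infer_instance
def pvWitness_mayor_problem : List String × List Int × List Int × List Int := (["a", "b"], [1, 2], [3, 4], [5, 6])

def Spec_mayor_problem (names : List String) (smells : List Int) (illegal_towns : List Int) (pollution_rivers : List Int) (out : Int × String) : Prop := out = mayor_problem_alt names smells illegal_towns pollution_rivers
instance (names : List String) (smells : List Int) (illegal_towns : List Int) (pollution_rivers : List Int) (out : Int × String) : Decidable (Spec_mayor_problem names smells illegal_towns pollution_rivers out) := by unfold Spec_mayor_problem; infer_instance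

-- ===== CLAIM (what is proved, stated in full; the proofs are below) =====
def Claim_equal_mayor_problem : Prop := ∀ (names : List String) (smells : List Int) (illegal_towns : List Int) (pollution_rivers : List Int), Dom_mayor_problem names smells illegal_towns pollution_rivers → Pre_mayor_problem names smells illegal_towns pollution_rivers → Spec_mayor_problem names smells illegal_towns pollution_rivers (mayor_problem names smells illegal_towns pollution_rivers)

-- ===== LEMMAS AND PROOFS =====

-- Running-max invariant: for any score function f and label function g on indices 0..b-1,
-- (first maximum of the mapped list, label at its first index) equals B's one-pass fold.
theorem pv_runmax (f : Int → Int) (g : Int → String) :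
    ∀ b : Int, 1 ≤ b →
    ∃ (m : Int) (k : Nat),
      PySem.List.max? ((PySem.List.pyRange 0 b 1).map f) (fun x => x) = some m ∧
      PySem.List.index? ((PySem.List.pyRange 0 b 1).map f) m = some k ∧
      (PySem.List.pyRange 1 b 1).foldl
        (fun acc i => if acc.1 < f i then (f i, g i) else acc) (f 0, g 0) = (m, g (k : Int)) := by
  intro b hb
  induction b, hb using Int.le_induction with
  | base =>
    refine ⟨f 0, 0, ?_, ?_, ?_⟩
    · rw [show PySem.List.pyRange 0 1 1 = [0] by decide]
      simp [PySem.List.max?_id_cons]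
    · rw [show PySem.List.pyRange 0 1 1 = [0] by decide]
      simp
    · rw [PySem.List.pyRange_one_eq_nil le_rfl]
      simp
  | succ b hb ih =>
    obtain ⟨m, k, h1, h2, h3⟩ := ih
    have hcons : PySem.List.pyRange 0 b 1 = 0 :: PySem.List.pyRange 1 b 1 := by
      simpa using PySem.List.pyRange_one_cons (show (0:Int) < b by omega)
    have hsucc : PySem.List.pyRange 0 (b+1) 1
        = PySem.List.pyRange 0 b 1 ++ [b] := PySem.List.pyRange_one_succ_right (by omega)
    have hsucc1 : PySem.List.pyRange 1 (b+1) 1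
        = PySem.List.pyRange 1 b 1 ++ [b] := PySem.List.pyRange_one_succ_right hb
    -- value of m as a running fold
    have hm : m = ((PySem.List.pyRange 1 b 1).map f).foldl max (f 0) := by
      rw [hcons] at h1
      simp [PySem.List.max?_id_cons] at h1
      omega
    have hmax1 : PySem.List.max? ((PySem.List.pyRange 0 (b+1) 1).map f) (fun x => x)
        = some (max m (f b)) := by
      rw [hsucc, hcons]
      simp [PySem.List.max?_id_cons, List.foldl_append, hm]
    by_cases hle : f b ≤ m
    · refine ⟨m, k, ?_, ?_, ?_⟩
      · rw [hmax1, max_eq_left hle]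
      · have hmem : m ∈ (PySem.List.pyRange 0 b 1).map f := PySem.List.max?_mem h1
        rw [hsucc, List.map_append, PySem.List.index?_append_of_mem _ hmem]
        exact h2
      · rw [hsucc1, List.foldl_append, h3]
        simp [not_lt.mpr hle]
    · rw [not_le] at hle
      have hnot : f b ∉ (PySem.List.pyRange 0 b 1).map f := by
        intro hmem
        have := PySem.List.max?_isMax h1 (f b) hmem
        simp at this
        omega
      refine ⟨f b, b.toNat, ?_, ?_, ?_⟩
      · rw [hmax1, max_eq_right (le_of_lt hle)]
      · rw [hsucc, List.map_append, List.map_cons, List.map_nil,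
            PySem.List.index?_append_singleton_self _ _ hnot]
        simp [PySem.List.length_pyRange_one]
      · rw [hsucc1, List.foldl_append, h3]
        have : ((b.toNat : Int)) = b := by omega
        simp [hle, this]

-- ===== VERDICT (by name: the statement is the Claim_ definition above) =====
theorem mayor_problem_spec : Claim_equal_mayor_problem := by
  intro names smells illegal_towns pollution_rivers _ hpre
  obtain ⟨hne, -, -, -⟩ := hpre
  have hb : (1 : Int) ≤ (names.length : Int) := by
    have : names.length ≠ 0 := fun h => hne (List.eq_nil_of_length_eq_zero h)
    omega
  obtain ⟨m, k, h1, h2, h3⟩ := pv_runmax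
    (fun i => PySem.List.pyGetD smells i 0 + PySem.List.pyGetD illegal_towns i 0 + PySem.List.pyGetD pollution_rivers i 0)
    (fun i => PySem.List.pyGetD names i "") (names.length : Int) hb
  unfold Spec_mayor_problem mayor_problem mayor_problem_alt
  have hmap : (PySem.List.pyRange 0 (names.length : Int) 1).foldl
      (fun acc i => acc ++ [PySem.List.pyGetD smells i 0 + PySem.List.pyGetD illegal_towns i 0 + PySem.List.pyGetD pollution_rivers i 0]) []
      = (PySem.List.pyRange 0 (names.length : Int) 1).map
        (fun i => PySem.List.pyGetD smells i 0 + PySem.List.pyGetD illegal_towns i 0 + PySem.List.pyGetD pollution_rivers i 0) :=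
    by simpa using PySem.List.foldl_append_singleton_eq_map _ _ []
  simp only [hmap, h1, h2, h3]
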